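-- pv_equiv track=rewrite | github.com/Yuanhy1997/GenBioEL | src/kbguided_pretrain/datagen/datagen.py | truncate_input_sequence
-- ===== SOURCE A (Python) =====
-- def truncate_input_sequence(document, max_num_tokens):
--     try:
--         total_length = len(sum(document, []))
--     except:
--         total_length = len(document)
--     if total_length <= max_num_tokens:
--         return document
--     else:
--         tokens_to_trunc = total_length - max_num_tokens
--         while tokens_to_trunc > 0:
--             if len(document[-1]) >= tokens_to_trunc:
--                 document[-1] = document[-1][:len(document[-1])-tokens_to_trunc]
--                 tokens_to_trunc = 0
--             else:
--                 tokens_to_trunc -= len(document[-1])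
--                 document = document[:-1]
--         return document
-- ===== SOURCE B (Python) =====
-- def truncate_input_sequence(document, max_num_tokens):
--     total = sum(len(s) for s in document)
--     if total <= max_num_tokens:
--         return document
--     out = []
--     budget = max_num_tokens
--     for sent in document:
--         if len(sent) <= budget:
--             out.append(sent)
--             budget -= len(sent)
--         else:
--             out.append(sent[:budget])
--             break
--     return out
-- ===== Notes on version B (the rewrite author's own statement) =====
-- stated objective: faster
-- what changed: B sums the per-list lengths instead of flattening (no O(n^2) list concatenation via sum(document, [])) and builds the kept prefix in one forward pass with a token budget, instead of A's backward while-loop that repeatedly slices the list; B also does not mutate the caller's sublists.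
-- outside the precondition, e.g. on truncate_input_sequence([[1]], -1): A raises IndexError, B returns [[]]
import Mathlib
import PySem

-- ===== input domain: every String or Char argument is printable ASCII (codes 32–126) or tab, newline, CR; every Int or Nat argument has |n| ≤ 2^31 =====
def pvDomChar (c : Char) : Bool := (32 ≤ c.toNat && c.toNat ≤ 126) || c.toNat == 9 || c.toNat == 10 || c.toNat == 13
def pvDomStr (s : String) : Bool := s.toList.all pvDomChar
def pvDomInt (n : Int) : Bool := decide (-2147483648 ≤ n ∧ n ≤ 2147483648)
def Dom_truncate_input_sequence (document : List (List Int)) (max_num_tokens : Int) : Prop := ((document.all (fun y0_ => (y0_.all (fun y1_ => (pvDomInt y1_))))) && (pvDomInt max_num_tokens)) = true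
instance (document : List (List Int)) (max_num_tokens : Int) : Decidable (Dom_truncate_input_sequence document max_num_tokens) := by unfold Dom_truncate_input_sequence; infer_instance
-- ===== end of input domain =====

-- B replaces A's quadratic flatten + backward slicing loop by a length sum and one forward
-- pass with a token budget (asymptotically faster in a timing run); equivalence is about
-- the RETURN value only: A mutates the caller's last kept sublist in place, B never mutates.


-- ===== PORT A =====
-- the while-loop: state (document, tokens_to_trunc); document[-1] on an empty list is an
-- IndexError in Python — that case is excluded by Pre_ and the port returns [] there
def truncLoopA (doc : List (List Int)) (ttt : Int) : List (List Int) :=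
  if ttt > 0 then
    match h : doc.getLast? with
    | none => []  -- Python raises IndexError here; unreachable under Pre_
    | some last =>
      if (last.length : Int) ≥ ttt then
        -- document[-1] = document[-1][:len(document[-1])-tokens_to_trunc]; then ttt = 0, loop exits
        doc.dropLast ++ [PySem.List.slice last none (some ((last.length : Int) - ttt))]
      else
        -- tokens_to_trunc -= len(document[-1]); document = document[:-1]
        truncLoopA doc.dropLast (ttt - last.length)
  else doc
termination_by doc.length
decreasing_by
  have : doc ≠ [] := by intro hn; simp [hn] at h
  simpa [List.length_dropLast] using Nat.sub_lt (List.length_pos_of_ne_nil this) one_pos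

def truncate_input_sequence (document : List (List Int)) (max_num_tokens : Int) : List (List Int) :=
  -- try: total_length = len(sum(document, [])) — never raises for a list of lists
  let total_length : Int := document.flatten.length
  if total_length ≤ max_num_tokens then document
  else truncLoopA document (total_length - max_num_tokens)

-- ===== PORT B =====
-- the for-loop with break: forward pass keeping a token budget
def altLoop (doc : List (List Int)) (budget : Int) : List (List Int) :=
  match doc with
  | [] => []
  | sent :: rest =>
    if (sent.length : Int) ≤ budget then sent :: altLoop rest (budget - sent.length)
    else [PySem.List.slice sent none (some budget)]  -- sent[:budget]; break

def truncate_input_sequence_alt (document : List (List Int)) (max_num_tokens : Int) : List (List Int) :=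
  let total : Int := (document.map (fun s => (s.length : Int))).sum
  if total ≤ max_num_tokens then document
  else altLoop document max_num_tokens

-- ===== PRECONDITION & SPEC =====
-- Pre_ excludes exactly max_num_tokens < 0, on which A's backward loop pops every list and
-- then indexes document[-1] of the empty list: an IndexError.
def Pre_truncate_input_sequence (document : List (List Int)) (max_num_tokens : Int) : Prop :=
  0 ≤ max_num_tokens
instance (document : List (List Int)) (max_num_tokens : Int) : Decidable (Pre_truncate_input_sequence document max_num_tokens) := by unfold Pre_truncate_input_sequence; infer_instance
def pvWitness_truncate_input_sequence : List (List Int) × Int := ([[1, 2], [3]], 2)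

def Spec_truncate_input_sequence (document : List (List Int)) (max_num_tokens : Int) (out : List (List Int)) : Prop := out = truncate_input_sequence_alt document max_num_tokens
instance (document : List (List Int)) (max_num_tokens : Int) (out : List (List Int)) : Decidable (Spec_truncate_input_sequence document max_num_tokens out) := by unfold Spec_truncate_input_sequence; infer_instance

-- ===== CLAIM (what is proved, stated in full; the proofs are below) =====
def Claim_equal_truncate_input_sequence : Prop := ∀ (document : List (List Int)) (max_num_tokens : Int), Dom_truncate_input_sequence document max_num_tokens → Pre_truncate_input_sequence document max_num_tokens → Spec_truncate_input_sequence document max_num_tokens (truncate_input_sequence document max_num_tokens)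

-- ===== LEMMAS AND PROOFS =====
-- total token count as B computes it
def sumLen (doc : List (List Int)) : Int := (doc.map (fun s => (s.length : Int))).sum

theorem sumLen_nil : sumLen [] = 0 := rfl
theorem sumLen_cons (s : List Int) (r : List (List Int)) :
    sumLen (s :: r) = (s.length : Int) + sumLen r := by simp [sumLen]
theorem sumLen_append (a b : List (List Int)) :
    sumLen (a ++ b) = sumLen a + sumLen b := by simp [sumLen]
theorem sumLen_nonneg (doc : List (List Int)) : 0 ≤ sumLen doc := by
  induction doc with
  | nil => simp [sumLen]
  | cons s r ih => rw [sumLen_cons]; positivity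

-- B's loop ignores anything appended after the point where it breaks
theorem altLoop_append (ds tail : List (List Int)) (b : Int)
    (hb : 0 ≤ b) (hlt : b < sumLen ds) :
    altLoop (ds ++ tail) b = altLoop ds b := by
  induction ds generalizing b with
  | nil => rw [sumLen_nil] at hlt; omega
  | cons s r ih =>
    rw [sumLen_cons] at hlt
    by_cases hf : (s.length : Int) ≤ b
    · simp only [List.cons_append, altLoop, if_pos hf]
      rw [ih (b - s.length) (by omega) (by omega)]
    · simp only [List.cons_append, altLoop, if_neg hf]

-- B's loop when every list of ds fits and the cut lands inside last
theorem altLoop_fits (ds : List (List Int)) (last : List Int) (b : Int)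
    (hge : sumLen ds ≤ b) (hlt : b < sumLen ds + last.length) :
    altLoop (ds ++ [last]) b = ds ++ [PySem.List.slice last none (some (b - sumLen ds))] := by
  induction ds generalizing b with
  | nil =>
    rw [sumLen_nil] at hge hlt
    simp only [List.nil_append, altLoop, if_neg (by omega : ¬ ((last.length : Int) ≤ b)), sumLen_nil]
    norm_num
  | cons s r ih =>
    rw [sumLen_cons] at hge hlt
    simp only [List.cons_append, altLoop, if_pos (by have := sumLen_nonneg r; omega : (s.length : Int) ≤ b)]
    rw [ih (b - s.length) (by omega) (by omega), sumLen_cons]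
    have : b - (s.length : Int) - sumLen r = b - ((s.length : Int) + sumLen r) := by omega
    rw [this]

-- the key correspondence: A's backward loop equals B's forward loop, budget = sumLen doc - ttt
theorem truncLoopA_eq_altLoop (doc : List (List Int)) (ttt : Int)
    (h1 : 0 < ttt) (h2 : ttt ≤ sumLen doc) :
    truncLoopA doc ttt = altLoop doc (sumLen doc - ttt) := by
  induction doc using List.reverseRecOn generalizing ttt with
  | nil => rw [sumLen_nil] at h2; omega
  | append_singleton ds last ih =>
    rw [truncLoopA, if_pos h1]
    rw [sumLen_append, sumLen_cons, sumLen_nil] at h2 ⊢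
    split
    · next heq => simp at heq
    · next last' heq =>
      have hl : last = last' := by simpa using heq
      subst hl
      by_cases hge : (last.length : Int) ≥ ttt
      · rw [if_pos hge, List.dropLast_concat,
            altLoop_fits ds last (sumLen ds + ((last.length : Int) + 0) - ttt)
              (by omega) (by omega),
            show sumLen ds + ((last.length : Int) + 0) - ttt - sumLen ds = (last.length : Int) - ttt from by omega]
      · rw [if_neg hge, List.dropLast_concat,
            ih (ttt - last.length) (by omega) (by omega),
            show sumLen ds + ((last.length : Int) + 0) - ttt = sumLen ds - (ttt - (last.length : Int)) by omega,
            altLoop_append ds [last] (sumLen ds - (ttt - (last.length : Int)))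
              (by omega) (by omega)]

theorem flatten_len_eq_sumLen (doc : List (List Int)) :
    (doc.flatten.length : Int) = sumLen doc := by
  induction doc with
  | nil => rfl
  | cons s r ih => simp [sumLen_cons, ← ih]

-- ===== VERDICT (by name: the statement is the Claim_ definition above) =====
theorem truncate_input_sequence_spec : Claim_equal_truncate_input_sequence := by
  intro document max_num_tokens _ hpre
  unfold Spec_truncate_input_sequence truncate_input_sequence truncate_input_sequence_alt
  rw [flatten_len_eq_sumLen]
  show (if sumLen document ≤ max_num_tokens then document
        else truncLoopA document (sumLen document - max_num_tokens)) = _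
  by_cases h : sumLen document ≤ max_num_tokens
  · rw [if_pos h]
    show _ = if sumLen document ≤ max_num_tokens then document else _
    rw [if_pos h]
  · rw [if_neg h]
    show _ = if sumLen document ≤ max_num_tokens then document else altLoop document max_num_tokens
    rw [if_neg h, truncLoopA_eq_altLoop document _ (by omega)
          (by have := hpre; unfold Pre_truncate_input_sequence at hpre; omega)]
    congr 1; omega
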